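-- pv_equiv track=rewrite | github.com/bartwisniewski/devsmentoring-alg | source/binary_search.py | search_higher
-- ===== SOURCE A (Python) =====
-- from typing import List, Callable
--
-- def search_higher(arr: List[int], limit_val: int) -> List[int]:
--     arr_sorted = sorted(arr)
--     left = 0
--     right = len(arr_sorted) - 1
--     while left <= right:
--         mid = (left + right) // 2
--         if arr_sorted[mid] <= limit_val:
--             left = mid + 1
--         else:
--             right = mid - 1
--     return arr_sorted[left:]
-- ===== SOURCE B (Python) =====
-- from typing import List
--
-- def search_higher(arr: List[int], limit_val: int) -> List[int]:
--     return sorted([x for x in arr if x > limit_val])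
-- ===== Notes on version B (the rewrite author's own statement) =====
-- stated objective: simpler
-- what changed: Replaces sort-whole-array-then-binary-search-boundary with a single filter of elements strictly greater than limit_val followed by sorting only that subset; no index loop at all.
import Mathlib
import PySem

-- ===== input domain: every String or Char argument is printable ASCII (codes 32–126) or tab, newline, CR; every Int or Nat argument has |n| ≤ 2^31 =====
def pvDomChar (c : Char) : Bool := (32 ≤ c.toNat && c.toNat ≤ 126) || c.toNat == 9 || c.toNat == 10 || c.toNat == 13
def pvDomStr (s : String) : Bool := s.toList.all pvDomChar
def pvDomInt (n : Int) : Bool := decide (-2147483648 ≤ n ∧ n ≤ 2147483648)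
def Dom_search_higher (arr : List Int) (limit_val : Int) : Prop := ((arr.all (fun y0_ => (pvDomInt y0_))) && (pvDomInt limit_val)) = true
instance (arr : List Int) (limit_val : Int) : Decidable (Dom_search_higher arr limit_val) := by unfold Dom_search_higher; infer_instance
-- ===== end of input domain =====

-- B replaces A's sort-then-binary-search-boundary by filtering the elements > limit_val and sorting that subset (simpler; same results).

-- ===== PORT A =====
-- the while-loop of A; the index mid is always in range when read (0 ≤ left ≤ mid ≤ right < len), so pyGetD is exact here
def sh_loop (s : List Int) (lv : Int) (left right : Int) : Int :=
  if h : left ≤ right then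
    let mid := PySem.Int.floordiv (left + right) 2
    if PySem.List.pyGetD s mid 0 ≤ lv then sh_loop s lv (mid + 1) right
    else sh_loop s lv left (mid - 1)
  else left
termination_by (right + 1 - left).toNat
decreasing_by
  · have := PySem.Int.floordiv_two_mid_bounds h; omega
  · have := PySem.Int.floordiv_two_mid_bounds h; omega

def search_higher (arr : List Int) (limit_val : Int) : List Int :=
  let arr_sorted := PySem.List.sorted arr (fun x => x) false
  let left := sh_loop arr_sorted limit_val 0 ((arr_sorted.length : Int) - 1)
  PySem.List.slice arr_sorted (some left) none

-- ===== PORT B =====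
def search_higher_alt (arr : List Int) (limit_val : Int) : List Int :=
  PySem.List.sorted (arr.filter (fun x => limit_val < x)) (fun x => x) false

-- ===== PRECONDITION & SPEC =====
def Spec_search_higher (arr : List Int) (limit_val : Int) (out : List Int) : Prop := out = search_higher_alt arr limit_val
instance (arr : List Int) (limit_val : Int) (out : List Int) : Decidable (Spec_search_higher arr limit_val out) := by unfold Spec_search_higher; infer_instance

-- ===== CLAIM (what is proved, stated in full; the proofs are below) =====
def Claim_equal_search_higher : Prop := ∀ (arr : List Int) (limit_val : Int), Dom_search_higher arr limit_val → Spec_search_higher arr limit_val (search_higher arr limit_val)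

-- ===== LEMMAS AND PROOFS =====

-- monotone access on a ≤-sorted list
lemma sorted_getElem_le (s : List Int) (hs : s.Pairwise (· ≤ ·)) (i j : Nat)
    (hij : i ≤ j) (hj : j < s.length) : s[i]'(by omega) ≤ s[j] := by
  rcases Nat.lt_or_eq_of_le hij with h | h
  · exact (List.pairwise_iff_getElem.mp hs) i j (by omega) hj h
  · subst h; exact le_refl _

-- the loop returns the boundary index: everything before it is ≤ lv, everything from it on is > lv
lemma sh_loop_spec (s : List Int) (lv : Int) (hs : s.Pairwise (· ≤ ·)) :
    ∀ left right : Int, 0 ≤ left → left ≤ right + 1 → right < (s.length : Int) →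
    (∀ i : Nat, (h : i < s.length) → (i : Int) < left → s[i] ≤ lv) →
    (∀ i : Nat, (h : i < s.length) → right < (i : Int) → lv < s[i]) →
    0 ≤ sh_loop s lv left right ∧ sh_loop s lv left right ≤ (s.length : Int) ∧
    (∀ i : Nat, (h : i < s.length) → (i : Int) < sh_loop s lv left right → s[i] ≤ lv) ∧
    (∀ i : Nat, (h : i < s.length) → sh_loop s lv left right ≤ (i : Int) → lv < s[i]) := by
  intro left right
  induction left, right using sh_loop.induct s lv with
  | case1 left right h mid hle ih =>
    intro h0 hlr hrlen hlo hhi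
    have hmid : left ≤ mid ∧ mid ≤ right := PySem.Int.floordiv_two_mid_bounds h
    have hmlen : mid.toNat < s.length := by omega
    have hget : PySem.List.pyGetD s mid 0 = s[mid.toNat] :=
      PySem.List.pyGetD_eq_getElem s 0 (by omega) (by omega)
    have hle' : PySem.List.pyGetD s (PySem.Int.floordiv (left + right) 2) 0 ≤ lv := hle
    rw [sh_loop, dif_pos h, if_pos hle']
    refine ih (by omega) (by omega) hrlen ?_ hhi
    intro i hi hilt
    have : s[i] ≤ s[mid.toNat] := sorted_getElem_le s hs i mid.toNat (by omega) hmlen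
    rw [hget] at hle; omega
  | case2 left right h mid hgt ih =>
    intro h0 hlr hrlen hlo hhi
    have hmid : left ≤ mid ∧ mid ≤ right := PySem.Int.floordiv_two_mid_bounds h
    have hmlen : mid.toNat < s.length := by omega
    have hget : PySem.List.pyGetD s mid 0 = s[mid.toNat] :=
      PySem.List.pyGetD_eq_getElem s 0 (by omega) (by omega)
    have hgt' : ¬ PySem.List.pyGetD s (PySem.Int.floordiv (left + right) 2) 0 ≤ lv := hgt
    rw [sh_loop, dif_pos h, if_neg hgt']
    refine ih h0 (by omega) (by omega) hlo ?_
    intro i hi hilt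
    have : s[mid.toNat] ≤ s[i] := sorted_getElem_le s hs mid.toNat i (by omega) hi
    rw [hget] at hgt; omega
  | case3 left right h =>
    intro h0 hlr hrlen hlo hhi
    rw [sh_loop, dif_neg h]
    exact ⟨h0, by omega, hlo, fun i hi hle => hhi i hi (by omega)⟩

-- on a list split at a boundary index r (fail before, hold after), filter = drop r
lemma filter_eq_drop (lv : Int) : ∀ (s : List Int) (r : Nat), r ≤ s.length →
    (∀ i : Nat, (h : i < s.length) → i < r → s[i] ≤ lv) →
    (∀ i : Nat, (h : i < s.length) → r ≤ i → lv < s[i]) →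
    s.filter (fun x => decide (lv < x)) = s.drop r := by
  intro s
  induction s with
  | nil => intro r _ _ _; simp
  | cons a t ih =>
    intro r hr hlo hhi
    cases r with
    | zero =>
      have hall : ∀ x ∈ a :: t, decide (lv < x) = true := by
        intro x hx
        rcases List.mem_iff_getElem.mp hx with ⟨i, hi, rfl⟩
        simpa using hhi i hi (Nat.zero_le _)
      simp [List.filter_eq_self.mpr hall]
    | succ r' =>
      have ha : a ≤ lv := by simpa using hlo 0 (by simp) (by omega)
      have : ¬ (lv < a) := by omega
      simp only [List.filter_cons, this, decide_eq_true_eq, List.drop_succ_cons]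
      exact ih r' (by simpa using hr)
        (fun i hi hir => by simpa using hlo (i+1) (by simpa using Nat.succ_lt_succ hi) (by omega))
        (fun i hi hir => by simpa using hhi (i+1) (by simpa using Nat.succ_lt_succ hi) (by omega))

-- ===== VERDICT (by name: the statement is the Claim_ definition above) =====
theorem search_higher_spec : Claim_equal_search_higher := by
  intro arr lv _
  unfold Spec_search_higher search_higher_alt
  set s := PySem.List.sorted arr (fun x => x) false with hsdef
  have hA : search_higher arr lv
      = PySem.List.slice s (some (sh_loop s lv 0 ((s.length : Int) - 1))) none := rfl
  rw [hA]
  have hs : s.Pairwise (· ≤ ·) := by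
    simpa using PySem.List.sorted_pairwise arr (fun x => x)
  have hperm : s.Perm arr := PySem.List.sorted_perm arr (fun x => x) false
  have hspec := sh_loop_spec s lv hs 0 ((s.length : Int) - 1) (by omega) (by omega) (by omega)
    (fun i hi h => by omega) (fun i hi h => by omega)
  set r := sh_loop s lv 0 ((s.length : Int) - 1) with hrdef
  obtain ⟨hr0, hrlen, hlo, hhi⟩ := hspec
  rw [PySem.List.slice_from _ hr0]
  have hdrop : s.filter (fun x => decide (lv < x)) = s.drop r.toNat :=
    filter_eq_drop lv s r.toNat (by omega)
      (fun i hi hir => hlo i hi (by omega))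
      (fun i hi hir => hhi i hi (by omega))
  refine (PySem.List.sorted_id_eq_of_perm_of_pairwise _ _ ?_ ?_).symm
  · rw [← hdrop]
    exact hperm.filter _
  · rw [← hdrop]
    exact hs.sublist List.filter_sublist
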